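-- pv_equiv track=rewrite | github.com/CharnyshSv/belhard57 | 6_7.py | sum_of_neighbour
-- ===== SOURCE A (Python) =====
-- def sum_of_neighbour(numbers: list) -> list:
--     neighbour = []
--     for i in range(len(numbers)):
--         if i == len(numbers) -1:
--             neighbour.append(numbers[i-1] + numbers[0])
--         else:
--             neighbour.append(numbers[i-1] + numbers[i+1])
--     return neighbour
-- ===== SOURCE B (Python) =====
-- def sum_of_neighbour(numbers: list) -> list:
--     left = numbers[-1:] + numbers[:-1]
--     right = numbers[1:] + numbers[:1]
--     return [l + r for l, r in zip(left, right)]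
-- ===== Notes on version B (the rewrite author's own statement) =====
-- stated objective: idiomatic
-- what changed: Replaced the index loop with its per-index last-element branch and negative-index wraparound by two slice-built rotations (left and right neighbour lists) summed elementwise with zip.
import Mathlib
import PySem

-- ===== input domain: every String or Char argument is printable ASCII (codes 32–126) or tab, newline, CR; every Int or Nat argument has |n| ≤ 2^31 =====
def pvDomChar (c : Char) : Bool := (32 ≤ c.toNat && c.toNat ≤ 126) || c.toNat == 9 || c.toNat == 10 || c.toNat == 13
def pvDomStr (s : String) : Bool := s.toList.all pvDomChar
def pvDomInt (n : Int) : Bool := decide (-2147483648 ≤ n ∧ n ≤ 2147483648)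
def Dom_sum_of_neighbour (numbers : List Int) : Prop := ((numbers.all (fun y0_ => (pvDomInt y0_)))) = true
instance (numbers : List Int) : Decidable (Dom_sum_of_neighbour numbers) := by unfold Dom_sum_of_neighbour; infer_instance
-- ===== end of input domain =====

-- B replaces A's per-index loop (with its last-element branch and negative-index wraparound)
-- by two slice-built rotated lists summed elementwise with zip (idiomatic decomposition).

-- ===== PORT A =====
-- for i in range(len(numbers)): append numbers[i-1] + (numbers[0] if i == len-1 else numbers[i+1])
def sum_of_neighbour (numbers : List Int) : List Int :=
  (PySem.List.pyRange 0 (numbers.length : Int) 1).foldl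
    (fun neighbour i =>
      if i = (numbers.length : Int) - 1 then
        neighbour ++ [PySem.List.pyGetD numbers (i - 1) 0 + PySem.List.pyGetD numbers 0 0]
      else
        neighbour ++ [PySem.List.pyGetD numbers (i - 1) 0 + PySem.List.pyGetD numbers (i + 1) 0])
    []

-- ===== PORT B =====
-- left = numbers[-1:] + numbers[:-1]; right = numbers[1:] + numbers[:1]; [l + r for l, r in zip(left, right)]
def sum_of_neighbour_alt (numbers : List Int) : List Int :=
  let left := PySem.List.slice numbers (some (-1)) none ++ PySem.List.slice numbers none (some (-1))
  let right := PySem.List.slice numbers (some 1) none ++ PySem.List.slice numbers none (some 1)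
  (left.zip right).map (fun p => p.1 + p.2)

-- ===== PRECONDITION & SPEC =====
def Spec_sum_of_neighbour (numbers : List Int) (out : List Int) : Prop := out = sum_of_neighbour_alt numbers
instance (numbers : List Int) (out : List Int) : Decidable (Spec_sum_of_neighbour numbers out) := by unfold Spec_sum_of_neighbour; infer_instance

-- ===== CLAIM (what is proved, stated in full; the proofs are below) =====
def Claim_equal_sum_of_neighbour : Prop := ∀ (numbers : List Int), Dom_sum_of_neighbour numbers → Spec_sum_of_neighbour numbers (sum_of_neighbour numbers)

-- ===== LEMMAS AND PROOFS =====

-- A's loop shape: an if with a singleton append on both branches, as one appended map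
theorem foldl_ite_append {α β : Type} (c : α → Prop) [DecidablePred c] (f g : α → β) (l : List α) (acc : List β) :
    l.foldl (fun acc x => if c x then acc ++ [f x] else acc ++ [g x]) acc
      = acc ++ l.map (fun x => if c x then f x else g x) := by
  induction l generalizing acc with
  | nil => simp
  | cons x xs ih => by_cases h : c x <;> simp [h, ih]

-- A as a map over the natural indices
theorem sum_of_neighbour_eq_map (numbers : List Int) :
    sum_of_neighbour numbers =
      (List.range numbers.length).map (fun (k : Nat) =>
        if (k : Int) = (numbers.length : Int) - 1 then
          PySem.List.pyGetD numbers ((k : Int) - 1) 0 + PySem.List.pyGetD numbers 0 0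
        else
          PySem.List.pyGetD numbers ((k : Int) - 1) 0 + PySem.List.pyGetD numbers ((k : Int) + 1) 0) := by
  unfold sum_of_neighbour
  rw [PySem.List.pyRange_one, List.foldl_map]
  simp only [zero_add, Int.sub_zero, Int.toNat_natCast]
  rw [foldl_ite_append (fun k : Nat => (k : Int) = (numbers.length : Int) - 1)]
  simp

theorem sum_of_neighbour_eq_alt (numbers : List Int) :
    sum_of_neighbour numbers = sum_of_neighbour_alt numbers := by
  rw [sum_of_neighbour_eq_map]
  unfold sum_of_neighbour_alt
  rw [PySem.List.slice_from_neg_one, PySem.List.slice_to_neg_one, PySem.List.slice_from_one]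
  rw [show ((1:Int)) = ((1:Nat) : Int) by norm_num, PySem.List.slice_to_natCast]
  set n := numbers.length with hn
  apply List.ext_getElem
  · simp [List.length_zip, List.length_dropLast, List.length_tail, List.length_take, List.length_drop]
    omega
  · intro k hk1 hk2
    have hkn : k < n := by simpa using hk1
    have hne : numbers ≠ [] := by
      intro h; rw [h] at hn; simp at hn; omega
    simp only [List.getElem_map, List.getElem_range, List.getElem_zip]
    rw [List.getElem_append, List.getElem_append]
    simp only [List.length_drop, List.length_tail, ← hn]
    have hgl : ∀ (i : Int) (m : Nat), 0 ≤ i → i.toNat = m → (hm : m < numbers.length) →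
        PySem.List.pyGetD numbers i 0 = numbers[m] := by
      intro i m hi him hm
      rw [PySem.List.pyGetD_eq_getElem numbers 0 hi (by omega)]
      exact getElem_congr rfl him (by omega)
    have hlast : PySem.List.pyGetD numbers (-1) 0 = numbers[n-1]'(by omega) := by
      rw [PySem.List.pyGetD_neg_one numbers 0 hne, List.getLast_eq_getElem]
    split_ifs with h1 h2 h3
    · omega
    · -- k = 0 and n = 1 (single element: both neighbours are the element itself)
      have hk0 : k = 0 := by omega
      subst hk0
      rw [show ((0:Nat):Int) - ((1:Nat):Int) = -1 by omega, hlast,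
          hgl 0 0 (by omega) (by omega) (by omega)]
      simp only [List.getElem_drop, List.getElem_take]
      congr 1 <;> exact getElem_congr rfl (by omega) (by omega)
    · omega
    · -- k = n - 1 ≥ 1 (last element: left neighbour k-1, right neighbour 0)
      have hge : 1 ≤ k := by omega
      rw [show ((k:Nat):Int) - ((1:Nat):Int) = ((k-1 : Nat):Int) by omega,
          hgl _ (k-1) (by omega) (by omega) (by omega),
          hgl 0 0 (by omega) (by omega) (by omega)]
      simp only [List.getElem_dropLast, List.getElem_take]
      congr 1 <;> exact getElem_congr rfl (by omega) (by omega)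
    · -- k = 0, n ≥ 2 (first element: left neighbour wraps to n-1)
      have hk0 : k = 0 := by omega
      subst hk0
      rw [show ((0:Nat):Int) - ((1:Nat):Int) = -1 by omega, hlast,
          show ((0:Nat):Int) + ((1:Nat):Int) = ((1:Nat):Int) by omega,
          hgl _ 1 (by omega) (by omega) (by omega)]
      simp only [List.getElem_drop, List.getElem_tail]
      congr 1
    · omega
    · -- 1 ≤ k < n - 1 (interior element)
      have hge : 1 ≤ k := by omega
      rw [show ((k:Nat):Int) - ((1:Nat):Int) = ((k-1 : Nat):Int) by omega,
          hgl _ (k-1) (by omega) (by omega) (by omega),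
          show ((k:Nat):Int) + ((1:Nat):Int) = ((k+1 : Nat):Int) by omega,
          hgl _ (k+1) (by omega) (by omega) (by omega)]
      simp only [List.getElem_dropLast, List.getElem_tail]
      congr 1 <;> exact getElem_congr rfl (by omega) (by omega)
    · omega

-- ===== VERDICT (by name: the statement is the Claim_ definition above) =====
theorem sum_of_neighbour_spec : Claim_equal_sum_of_neighbour := by
  intro numbers _
  exact sum_of_neighbour_eq_alt numbers
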